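-- pv_equiv track=rewrite | github.com/DinnoKoluh/keyword_extractor | utils.py | join_MWE
-- ===== SOURCE A (Python) =====
-- def join_MWE(tokens):
--     """
--     Joins consecutive tokens that start with capital letters in MWE.
--     Example: "I go to New York to study" -> "I go to New_York to study".
--     """
--     out_tokens = []
--     i = 0
--     while i < len(tokens):
--         if tokens[i][0].isupper(): # is the current token uppercase
--             mw_token = tokens[i]
--             i = i + 1
--             flag = False
--             while i < len(tokens) and tokens[i][0].isupper(): # while the next token is uppercase and the iterator is less then the length of the number of tokens
--                 flag = True
--                 mw_token = mw_token + '_' + tokens[i]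
--                 i = i + 1
--             if flag: # if MWE is found, append it and skip all the consequent steps
--                 out_tokens.append(mw_token)
--                 continue
--             else:  #i if not, go back on step
--                 i = i - 1
--         out_tokens.append(tokens[i])
--         i = i + 1
--     return out_tokens
-- ===== SOURCE B (Python) =====
-- def join_MWE(tokens):
--     """Single forward pass keeping a run of consecutive capitalized tokens;
--     flush the run with '_'.join on each non-capitalized token and at the end."""
--     out_tokens = []
--     run = []
--     for t in tokens:
--         if t[0].isupper():
--             run.append(t)
--         else:
--             if run:
--                 out_tokens.append('_'.join(run))
--                 run = []
--             out_tokens.append(t)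
--     if run:
--         out_tokens.append('_'.join(run))
--     return out_tokens
-- ===== Notes on version B (the rewrite author's own statement) =====
-- stated objective: simpler
-- what changed: Replaces A's index-driven while loop with nested scan, flag and 'go back one step' backtracking by a single forward pass that accumulates a run of consecutive capitalized tokens and flushes it with '_'.join (linear, vs A's repeated string concatenation over the run).
-- outside the precondition, e.g. on join_MWE(['']): A raises IndexError, B raises IndexError
import Mathlib
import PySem

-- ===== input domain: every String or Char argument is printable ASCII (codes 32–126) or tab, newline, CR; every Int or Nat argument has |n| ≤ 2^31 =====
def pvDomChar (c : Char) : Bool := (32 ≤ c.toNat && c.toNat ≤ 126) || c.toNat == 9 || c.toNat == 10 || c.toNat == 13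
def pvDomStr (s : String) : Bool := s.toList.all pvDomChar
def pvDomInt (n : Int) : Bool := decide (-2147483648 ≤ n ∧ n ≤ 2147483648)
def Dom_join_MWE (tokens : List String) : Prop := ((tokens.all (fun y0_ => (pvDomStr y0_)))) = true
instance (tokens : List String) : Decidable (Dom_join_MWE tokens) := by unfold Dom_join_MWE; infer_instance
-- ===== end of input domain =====

-- B replaces A's index-driven nested while loops (with flag and back-one-step) by one
-- forward pass keeping a run of consecutive capitalized tokens, flushed with '_'.join: simpler.
-- Both Pythons raise IndexError on a token that is the empty string (t[0]); Pre_ excludes that.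

-- ===== PORT A =====
-- tokens[i][0].isupper(); only evaluated on nonempty strings inside Pre_ (t[0] raises on "")
def pvIsCap (t : String) : Bool :=
  match PySem.Str.pyGet? t 0 with
  | some c => PySem.Chars.isupper c
  | none => false

-- inner while loop of A: consumes capitalized tokens, building mw_token and the flag
def pvSpanA (mw : String) : List String → String × Bool × List String
  | [] => (mw, false, [])
  | t :: rest =>
    if pvIsCap t then
      let r := pvSpanA (mw ++ "_" ++ t) rest
      (r.1, true, r.2.2)
    else (mw, false, t :: rest)

theorem pvSpanA_len (mw : String) (ts : List String) :
    (pvSpanA mw ts).2.2.length ≤ ts.length := by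
  induction ts generalizing mw with
  | nil => simp [pvSpanA]
  | cons t rest ih =>
    simp only [pvSpanA]
    split
    · exact le_trans (ih _) (Nat.le_succ _)
    · simp

def join_MWE : List String → List String
  | [] => []
  | t :: rest =>
    if pvIsCap t then
      let r := pvSpanA t rest
      if r.2.1 then r.1 :: join_MWE r.2.2
      else t :: join_MWE rest
    else t :: join_MWE rest
termination_by ts => ts.length
decreasing_by
  · exact Nat.lt_succ_of_le (pvSpanA_len _ _)
  · simp
  · simp

-- ===== PORT B =====
-- loop body of B: accumulate capitalized t into the run, else flush the run then emit t
def pvStepB (acc : List String × List String) (t : String) : List String × List String :=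
  if pvIsCap t then (acc.1, acc.2 ++ [t])
  else if acc.2.isEmpty then (acc.1 ++ [t], acc.2)
  else (acc.1 ++ [PySem.Str.join "_" acc.2, t], [])

def join_MWE_alt (tokens : List String) : List String :=
  let s := tokens.foldl pvStepB ([], [])
  if s.2.isEmpty then s.1 else s.1 ++ [PySem.Str.join "_" s.2]

-- ===== PRECONDITION & SPEC =====
-- Pre_ excludes tokens containing the empty string, on which A raises IndexError at t[0]
def Pre_join_MWE (tokens : List String) : Prop := ∀ t ∈ tokens, t ≠ ""
instance (tokens : List String) : Decidable (Pre_join_MWE tokens) := by unfold Pre_join_MWE; infer_instance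
def pvWitness_join_MWE : List String := ["I", "go", "to", "New", "York", "to", "study"]

def Spec_join_MWE (tokens : List String) (out : List String) : Prop := out = join_MWE_alt tokens
instance (tokens : List String) (out : List String) : Decidable (Spec_join_MWE tokens out) := by unfold Spec_join_MWE; infer_instance

-- ===== CLAIM =====
def Claim_equal_join_MWE : Prop := ∀ (tokens : List String), Dom_join_MWE tokens → Pre_join_MWE tokens → Spec_join_MWE tokens (join_MWE tokens)

-- ===== LEMMAS AND PROOFS =====

-- reference function both ports are reduced to
def pvRef : List String → List String
  | [] => []
  | t :: rest =>
    if pvIsCap t then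
      PySem.Str.join "_" (t :: rest.takeWhile pvIsCap) :: pvRef (rest.dropWhile pvIsCap)
    else t :: pvRef rest
termination_by ts => ts.length
decreasing_by
  · exact Nat.lt_succ_of_le (List.length_dropWhile_le _ _)
  · simp

theorem pvJoin_cc (a b : String) (l : List String) :
    PySem.Str.join "_" (a :: b :: l) = a ++ "_" ++ PySem.Str.join "_" (b :: l) := by
  apply String.toList_inj.mp
  simp [PySem.Str.toList_join, PySem.Chars.join_cons_cons]

theorem pvJoin_cons (a b : String) (l : List String) :
    PySem.Str.join "_" ((a ++ "_" ++ b) :: l) = a ++ "_" ++ PySem.Str.join "_" (b :: l) := by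
  cases l with
  | nil =>
    apply String.toList_inj.mp
    simp [PySem.Str.toList_join, PySem.Chars.join_singleton]
  | cons c l =>
    apply String.toList_inj.mp
    simp [PySem.Str.toList_join, PySem.Chars.join_cons_cons]

theorem pvFoldl_join (l : List String) (a : String) :
    List.foldl (fun acc t => acc ++ "_" ++ t) a l = PySem.Str.join "_" (a :: l) := by
  induction l generalizing a with
  | nil =>
    apply String.toList_inj.mp
    simp [PySem.Str.toList_join, PySem.Chars.join_singleton]
  | cons b l ih => simp only [List.foldl, ih, pvJoin_cons, pvJoin_cc]

theorem pvSpanA_spec (ts : List String) (mw : String) :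
    pvSpanA mw ts = (List.foldl (fun acc t => acc ++ "_" ++ t) mw (ts.takeWhile pvIsCap),
                     !(ts.takeWhile pvIsCap).isEmpty, ts.dropWhile pvIsCap) := by
  induction ts generalizing mw with
  | nil => simp [pvSpanA]
  | cons t rest ih =>
    simp only [pvSpanA]
    by_cases h : pvIsCap t
    · simp [h, ih]
    · simp [h]

theorem pvA_eq_ref (ts : List String) : join_MWE ts = pvRef ts := by
  have H : ∀ n (ts : List String), ts.length ≤ n → join_MWE ts = pvRef ts := by
    intro n
    induction n with
    | zero =>
      intro ts h
      have : ts = [] := List.eq_nil_of_length_eq_zero (Nat.le_zero.mp h)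
      subst this; simp [join_MWE, pvRef]
    | succ n ih =>
      intro ts h
      match ts with
      | [] => simp [join_MWE, pvRef]
      | t :: rest =>
        have hrest : rest.length ≤ n := by simpa using h
        by_cases hc : pvIsCap t
        · rw [join_MWE, pvRef]
          simp only [hc, if_true, pvSpanA_spec, pvFoldl_join]
          by_cases he : (rest.takeWhile pvIsCap).isEmpty
          · have htw : rest.takeWhile pvIsCap = [] := by
              simpa [List.isEmpty_iff] using he
            have hdw : rest.dropWhile pvIsCap = rest := by
              have := List.takeWhile_append_dropWhile (p := pvIsCap) (l := rest)
              rwa [htw, List.nil_append] at this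
            have hj : PySem.Str.join "_" [t] = t := by
              apply String.toList_inj.mp
              simp [PySem.Str.toList_join, PySem.Chars.join_singleton]
            simp [htw, hdw, hj, ih rest hrest]
          · simp only [he, Bool.not_false, if_true]
            have : (rest.dropWhile pvIsCap).length ≤ n :=
              le_trans (List.length_dropWhile_le _ _) hrest
            rw [ih _ this]
        · rw [join_MWE, pvRef]
          simp [hc, ih rest hrest]
  exact H ts.length ts le_rfl

theorem pvStepB_out (out run : List String) (t : String) :
    pvStepB (out, run) t = (out ++ (pvStepB ([], run) t).1, (pvStepB ([], run) t).2) := by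
  simp only [pvStepB]
  split <;> [skip; split] <;> simp

-- finish of the fold splits off the accumulated output prefix
theorem pvFoldB_out (ts : List String) (out run : List String) :
    (let s := ts.foldl pvStepB (out, run);
     if s.2.isEmpty then s.1 else s.1 ++ [PySem.Str.join "_" s.2]) =
    out ++ (let s := ts.foldl pvStepB ([], run);
     if s.2.isEmpty then s.1 else s.1 ++ [PySem.Str.join "_" s.2]) := by
  induction ts generalizing out run with
  | nil => by_cases h : run.isEmpty <;> simp [h]
  | cons t ts ih =>
    simp only [List.foldl, pvStepB_out out run t]
    rw [ih, ih (pvStepB ([], run) t).1, List.append_assoc]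

-- the fold with run accumulator computes pvRef
def pvG (run : List String) (ts : List String) : List String :=
  let s := ts.foldl pvStepB ([], run)
  if s.2.isEmpty then s.1 else s.1 ++ [PySem.Str.join "_" s.2]

theorem pvG_cons (run : List String) (t : String) (ts : List String) :
    pvG run (t :: ts) = (pvStepB ([], run) t).1 ++ pvG (pvStepB ([], run) t).2 ts := by
  simp only [pvG, List.foldl]
  have := pvFoldB_out ts (pvStepB ([], run) t).1 (pvStepB ([], run) t).2
  simpa using this

theorem pvG_spec (ts : List String) (run : List String) :
    pvG run ts = if run.isEmpty then pvRef ts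
                 else PySem.Str.join "_" (run ++ ts.takeWhile pvIsCap) :: pvRef (ts.dropWhile pvIsCap) := by
  induction ts generalizing run with
  | nil =>
    by_cases h : run.isEmpty
    · simp [pvG, h, pvRef]
    · simp [pvG, h, pvRef]
  | cons t ts ih =>
    rw [pvG_cons]
    by_cases hc : pvIsCap t
    · have hstep : pvStepB ([], run) t = ([], run ++ [t]) := by simp [pvStepB, hc]
      rw [hstep]
      simp only [List.nil_append]
      rw [ih]
      have hne : (run ++ [t]).isEmpty = false := by simp
      by_cases h : run.isEmpty
      · have hrun : run = [] := by simpa [List.isEmpty_iff] using h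
        subst hrun
        simp [pvRef, hc]
      · simp [h, hc, List.append_assoc]
    · by_cases h : run.isEmpty
      · have hstep : pvStepB ([], run) t = ([t], run) := by simp [pvStepB, hc, h]
        have hrun : run = [] := by simpa [List.isEmpty_iff] using h
        subst hrun
        rw [hstep, ih]
        simp [pvRef, hc]
      · have hstep : pvStepB ([], run) t = ([PySem.Str.join "_" run, t], []) := by
          simp [pvStepB, hc, h]
        rw [hstep, ih]
        simp [pvRef, hc, h]

theorem pvB_eq_ref (ts : List String) : join_MWE_alt ts = pvRef ts := by
  have := pvG_spec ts []
  simpa [pvG, join_MWE_alt] using this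

-- ===== VERDICT =====
theorem join_MWE_spec : Claim_equal_join_MWE := by
  intro tokens _ _
  unfold Spec_join_MWE
  rw [pvA_eq_ref, pvB_eq_ref]
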